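-- pv_equiv track=rewrite | github.com/radhika-mdev/playwright | pythonSelenium/Demo/sumOfNumbers.py | searchnum
-- ===== SOURCE A (Python) =====
-- def searchnum(n,k):
--     pair={}
--     for i in n:
--         num=k-i
--         if num in n and i !=num:
--             pair[num]=i
--         elif num in n and i ==num and n.count(num)>1:
--             pair[num]=i
--         else:
--             pass
--     return pair
-- ===== SOURCE B (Python) =====
-- def searchnum(n, k):
--     s = set(n)
--     good = s & {k - v for v in s}
--     if k % 2 == 0 and n.count(k // 2) < 2:
--         good.discard(k // 2)
--     return {k - i: i for i in dict.fromkeys(n) if i in good}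
-- ===== Notes on version B (the rewrite author's own statement) =====
-- stated objective: faster
-- what changed: B computes the qualifying elements wholesale by set algebra -- good = set(n) & {k-v for v in set(n)} with one discard correcting the self-paired element k//2 -- then emits the dict in one comprehension over first occurrences, instead of A's per-element linear 'num in n' scans, n.count calls and dict overwrites inside the loop.
import Mathlib
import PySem

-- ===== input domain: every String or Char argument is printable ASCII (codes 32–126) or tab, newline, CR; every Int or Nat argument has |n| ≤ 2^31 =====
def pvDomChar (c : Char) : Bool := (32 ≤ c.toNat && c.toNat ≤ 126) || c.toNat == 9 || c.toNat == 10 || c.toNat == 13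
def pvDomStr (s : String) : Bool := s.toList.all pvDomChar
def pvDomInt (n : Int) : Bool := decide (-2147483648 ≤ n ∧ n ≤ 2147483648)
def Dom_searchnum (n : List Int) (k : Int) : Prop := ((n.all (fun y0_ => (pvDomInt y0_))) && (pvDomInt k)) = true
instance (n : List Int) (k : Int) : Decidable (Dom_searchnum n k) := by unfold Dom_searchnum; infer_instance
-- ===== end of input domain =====

-- B replaces A's per-element membership/count scans and dict overwrites by set algebra:
-- good = set(n) ∩ (k − set(n)), one discard fixing the self-paired element, then one
-- comprehension over first occurrences; same return value, built by a different route.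

-- ===== PORT A =====
def searchnum (n : List Int) (k : Int) : List (Int × Int) :=
  (n.foldl (fun pair i =>
      let num := k - i
      if n.contains num && decide (i ≠ num) then pair.insert num i
      else if n.contains num && decide (i = num) && decide ((1 : Int) < (n.count num : Int)) then
        pair.insert num i
      else pair)
    PySem.Dict.empty).items

-- ===== PORT B =====
def searchnum_alt (n : List Int) (k : Int) : List (Int × Int) :=
  let s : PySem.Set Int := PySem.Set.ofList n
  let good0 : PySem.Set Int := PySem.Set.inter s (PySem.Set.ofList (s.map (fun v => k - v)))
  let good : PySem.Set Int :=
    if decide (PySem.Int.mod k 2 = 0) && decide ((n.count (PySem.Int.floordiv k 2) : Int) < 2) then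
      PySem.Set.discard good0 (PySem.Int.floordiv k 2)
    else good0
  (((PySem.List.dedup n).filter (fun i => PySem.Set.contains good i)).foldl
      (fun d i => d.insert (k - i) i) PySem.Dict.empty).items

-- ===== PRECONDITION & SPEC =====
def Spec_searchnum (n : List Int) (k : Int) (out : List (Int × Int)) : Prop := out = searchnum_alt n k
instance (n : List Int) (k : Int) (out : List (Int × Int)) : Decidable (Spec_searchnum n k out) := by unfold Spec_searchnum; infer_instance

-- ===== CLAIM (what is proved, stated in full; the proofs are below) =====
def Claim_equal_searchnum : Prop := ∀ (n : List Int) (k : Int), Dom_searchnum n k → Spec_searchnum n k (searchnum n k)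

-- ===== LEMMAS AND PROOFS =====

-- A's loop body, named so the invariant lemma can speak about it (definitionally A's lambda).
def pvStepA (n : List Int) (k : Int) (pair : PySem.Dict Int Int) (i : Int) : PySem.Dict Int Int :=
  let num := k - i
  if n.contains num && decide (i ≠ num) then pair.insert num i
  else if n.contains num && decide (i = num) && decide ((1 : Int) < (n.count num : Int)) then
    pair.insert num i
  else pair

-- A's two insert branches, merged into one boolean condition on the element alone.
def pvCond (n : List Int) (k : Int) (i : Int) : Bool :=
  n.contains (k - i) && (decide (i ≠ k - i) || decide ((1 : Int) < (n.count i : Int)))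

-- B's qualifying set, named (definitionally the set B's comprehension tests against).
def pvGood (n : List Int) (k : Int) : PySem.Set Int :=
  if decide (PySem.Int.mod k 2 = 0) && decide ((n.count (PySem.Int.floordiv k 2) : Int) < 2) then
    PySem.Set.discard (PySem.Set.inter (PySem.Set.ofList n)
      (PySem.Set.ofList ((PySem.Set.ofList n).map (fun v => k - v)))) (PySem.Int.floordiv k 2)
  else
    PySem.Set.inter (PySem.Set.ofList n)
      (PySem.Set.ofList ((PySem.Set.ofList n).map (fun v => k - v)))

theorem pvStepA_eq (n : List Int) (k : Int) (d : PySem.Dict Int Int) (x : Int) :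
    pvStepA n k d x
      = if (n.contains (k - x) && decide (x ≠ k - x)) = true then d.insert (k - x) x
        else if (n.contains (k - x) && decide (x = k - x)
            && decide ((1 : Int) < (n.count (k - x) : Int))) = true then d.insert (k - x) x
        else d := rfl

theorem pvStepA_of_cond (n : List Int) (k : Int) (x : Int) (d : PySem.Dict Int Int)
    (hc : pvCond n k x = true) : pvStepA n k d x = d.insert (k - x) x := by
  have hc2 : n.contains (k - x) = true ∧ (x ≠ k - x ∨ (1 : Int) < (n.count x : Int)) := by
    unfold pvCond at hc
    simpa only [Bool.and_eq_true, Bool.or_eq_true, decide_eq_true_eq] using hc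
  by_cases hne : x = k - x
  · have hcnt : (1 : Int) < (n.count x : Int) := by
      rcases hc2.2 with h | h
      · exact absurd hne h
      · exact h
    have hd1 : decide (x ≠ k - x) = false := decide_eq_false (not_not_intro hne)
    have hd2 : decide (x = k - x) = true := decide_eq_true hne
    have hd3 : decide ((1 : Int) < (n.count (k - x) : Int)) = true :=
      decide_eq_true (by rw [← hne]; exact hcnt)
    have e1 : (n.contains (k - x) && decide (x ≠ k - x)) = false := by
      rw [hd1, Bool.and_false]
    have e2 : (n.contains (k - x) && decide (x = k - x)
        && decide ((1 : Int) < (n.count (k - x) : Int))) = true := by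
      rw [hc2.1, hd2, hd3]
      rfl
    rw [pvStepA_eq, e1, e2]
    simp
  · have hd1 : decide (x ≠ k - x) = true := decide_eq_true hne
    have e1 : (n.contains (k - x) && decide (x ≠ k - x)) = true := by
      rw [hc2.1, hd1]
      rfl
    rw [pvStepA_eq, e1]
    simp

theorem pvStepA_of_not_cond (n : List Int) (k : Int) (x : Int) (d : PySem.Dict Int Int)
    (hc : pvCond n k x = false) : pvStepA n k d x = d := by
  by_cases hcont : n.contains (k - x) = true
  · have hne : x = k - x := by
      by_contra hne
      have ht : pvCond n k x = true := by
        unfold pvCond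
        rw [hcont, decide_eq_true (show x ≠ k - x from hne)]
        simp
      rw [hc] at ht
      simp at ht
    have hcnt : ¬ ((1 : Int) < (n.count x : Int)) := by
      intro hlt
      have ht : pvCond n k x = true := by
        unfold pvCond
        rw [hcont, decide_eq_true hlt]
        simp
      rw [hc] at ht
      simp at ht
    have hd1 : decide (x ≠ k - x) = false := decide_eq_false (not_not_intro hne)
    have hd3 : decide ((1 : Int) < (n.count (k - x) : Int)) = false :=
      decide_eq_false (by rw [← hne]; exact hcnt)
    have e1 : (n.contains (k - x) && decide (x ≠ k - x)) = false := by
      rw [hd1, Bool.and_false]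
    have e2 : (n.contains (k - x) && decide (x = k - x)
        && decide ((1 : Int) < (n.count (k - x) : Int))) = false := by
      rw [hd3, Bool.and_false]
    rw [pvStepA_eq, e1, e2]
    simp
  · have hcf : n.contains (k - x) = false := by simpa using hcont
    have e1 : (n.contains (k - x) && decide (x ≠ k - x)) = false := by
      rw [hcf, Bool.false_and]
    have e2 : (n.contains (k - x) && decide (x = k - x)
        && decide ((1 : Int) < (n.count (k - x) : Int))) = false := by
      rw [hcf]
      simp
    rw [pvStepA_eq, e1, e2]
    simp

-- A's loop invariant: the dict built so far holds (k-i, i) for the seen qualifying i's.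
theorem pvAloop (n : List Int) (k : Int) : ∀ (l : List Int) (S : List Int) (d : PySem.Dict Int Int),
    d.items = S.map (fun i => (k - i, i)) →
    (l.foldl (pvStepA n k) d).items
      = (PySem.Set.update S (l.filter (pvCond n k))).map (fun i => (k - i, i)) := by
  intro l
  induction l with
  | nil =>
    intro S d hd
    simpa [PySem.Set.update_nil] using hd
  | cons x l ih =>
    intro S d hd
    simp only [List.foldl_cons, List.filter_cons]
    by_cases hc : pvCond n k x = true
    · rw [hc, if_pos rfl, pvStepA_of_cond n k x d hc, PySem.Set.update_cons]
      by_cases hmem : x ∈ S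
      · have hcontains : d.contains (k - x) = true := by
          rw [PySem.Dict.contains_iff_mem_keys]
          simp only [PySem.Dict.keys]
          rw [hd, List.map_map]
          exact List.mem_map.mpr ⟨x, hmem, rfl⟩
        have hitems : (d.insert (k - x) x).items = S.map (fun i => (k - i, i)) := by
          rw [PySem.Dict.items_insert_of_contains d x hcontains, hd, List.map_map]
          apply List.map_congr_left
          intro i _
          simp only [Function.comp_apply]
          by_cases he : k - i = k - x
          · have hix : i = x := by omega
            simp [hix]
          · simp [he]
        rw [PySem.Set.add_of_mem hmem]
        exact ih S _ hitems
      · have hcontains : d.contains (k - x) = false := by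
          rw [← Bool.not_eq_true, PySem.Dict.contains_iff_mem_keys]
          simp only [PySem.Dict.keys]
          rw [hd, List.map_map]
          intro h
          obtain ⟨j, hj, hje⟩ := List.mem_map.mp h
          simp only [Function.comp_apply] at hje
          have hjx : j = x := by omega
          exact hmem (hjx ▸ hj)
        have hitems : (d.insert (k - x) x).items = (S ++ [x]).map (fun i => (k - i, i)) := by
          rw [PySem.Dict.items_insert_of_not_contains d x hcontains, hd]
          simp
        rw [PySem.Set.add_of_not_mem hmem]
        exact ih (S ++ [x]) _ hitems
    · have hc' : pvCond n k x = false := by simpa using hc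
      rw [hc', pvStepA_of_not_cond n k x d hc']
      simp only [Bool.false_eq_true, if_neg, not_false_iff]
      exact ih S d hd

-- first-occurrence dedup commutes with filtering.
theorem pvOfListFilter (p : Int → Bool) (n : List Int) :
    PySem.Set.ofList (n.filter p) = (PySem.Set.ofList n).filter p := by
  induction n using List.reverseRecOn with
  | nil => simp
  | append_singleton xs x ih =>
    rw [List.filter_append, PySem.Set.ofList_append_singleton]
    by_cases hp : p x = true
    · rw [show List.filter p [x] = [x] by simp [hp], PySem.Set.ofList_append_singleton, ih]
      by_cases hmem : x ∈ xs
      · rw [PySem.Set.add_of_mem ((PySem.Set.mem_ofList xs x).mpr hmem),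
          PySem.Set.add_of_mem
            (List.mem_filter.mpr ⟨(PySem.Set.mem_ofList xs x).mpr hmem, hp⟩)]
      · rw [PySem.Set.add_of_not_mem (fun h => hmem ((PySem.Set.mem_ofList xs x).mp h)),
          PySem.Set.add_of_not_mem
            (fun h => hmem ((PySem.Set.mem_ofList xs x).mp (List.mem_filter.mp h).1)),
          List.filter_append]
        simp [hp]
    · rw [show List.filter p [x] = [] by simp [hp], List.append_nil, ih]
      by_cases hmem : x ∈ xs
      · rw [PySem.Set.add_of_mem ((PySem.Set.mem_ofList xs x).mpr hmem)]
      · rw [PySem.Set.add_of_not_mem (fun h => hmem ((PySem.Set.mem_ofList xs x).mp h)),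
          List.filter_append]
        simp [hp]

-- on members of n, B's set-algebra membership test equals A's merged condition.
theorem pvGoodMem (n : List Int) (k : Int) (i : Int) (hi : i ∈ n) :
    PySem.Set.contains (pvGood n k) i = pvCond n k i := by
  have hg0 : ∀ j : Int, j ∈ PySem.Set.inter (PySem.Set.ofList n)
      (PySem.Set.ofList ((PySem.Set.ofList n).map (fun v => k - v))) ↔ (j ∈ n ∧ (k - j) ∈ n) := by
    intro j
    rw [PySem.Set.mem_inter, PySem.Set.mem_ofList, PySem.Set.mem_ofList]
    constructor
    · rintro ⟨h1, h2⟩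
      refine ⟨h1, ?_⟩
      obtain ⟨v, hv, hve⟩ := List.mem_map.mp h2
      rw [PySem.Set.mem_ofList] at hv
      have hvv : k - j = v := by omega
      exact hvv ▸ hv
    · rintro ⟨h1, h2⟩
      exact ⟨h1, List.mem_map.mpr ⟨k - j, (PySem.Set.mem_ofList n (k - j)).mpr h2, by ring⟩⟩
  rw [Bool.eq_iff_iff]
  unfold pvGood pvCond
  simp only [PySem.Set.contains_eq_listContains, List.contains_iff_mem, Bool.and_eq_true,
    Bool.or_eq_true, decide_eq_true_eq]
  split_ifs with hbr
  · have hmod : PySem.Int.mod k 2 = 0 := hbr.1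
    have hcnt2 : (n.count (PySem.Int.floordiv k 2) : Int) < 2 := hbr.2
    obtain ⟨m, hm⟩ := (PySem.Int.mod_eq_zero_iff_dvd k 2).mp hmod
    have hfd : PySem.Int.floordiv k 2 = m := by
      rw [PySem.Int.floordiv_eq_ediv_of_pos (by norm_num : (0 : Int) < 2), hm]
      exact Int.mul_ediv_cancel_left m (by norm_num)
    rw [hfd] at hcnt2
    rw [PySem.Set.mem_discard, hg0 i, hfd]
    constructor
    · rintro ⟨⟨-, h2⟩, h3⟩
      exact ⟨h2, Or.inl (by omega)⟩
    · rintro ⟨h2, h3⟩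
      refine ⟨⟨hi, h2⟩, ?_⟩
      rcases h3 with h3 | h3
      · omega
      · intro he
        rw [he] at h3
        omega
  · rw [hg0 i]
    constructor
    · rintro ⟨-, h2⟩
      refine ⟨h2, ?_⟩
      by_cases hne : i = k - i
      · right
        have hmod : PySem.Int.mod k 2 = 0 := (PySem.Int.mod_eq_zero_iff_dvd k 2).mpr ⟨i, by omega⟩
        have hfd : PySem.Int.floordiv k 2 = i := by
          rw [PySem.Int.floordiv_eq_ediv_of_pos (by norm_num : (0 : Int) < 2),
            show k = 2 * i by omega]
          exact Int.mul_ediv_cancel_left i (by norm_num)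
        have hge : ¬ ((n.count (PySem.Int.floordiv k 2) : Int) < 2) := by
          intro hlt
          exact hbr ⟨hmod, hlt⟩
        rw [hfd] at hge
        omega
      · exact Or.inl hne
    · rintro ⟨h2, -⟩
      exact ⟨hi, h2⟩

-- B's fold of inserts over distinct fresh keys just lists the qualifying first occurrences.
theorem pvAltEq (n : List Int) (k : Int) :
    searchnum_alt n k
      = ((PySem.List.dedup n).filter (fun i => PySem.Set.contains (pvGood n k) i)).map
          (fun i => (k - i, i)) := by
  have hnd : ((PySem.List.dedup n).filter (fun i => PySem.Set.contains (pvGood n k) i)).Nodup :=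
    (PySem.List.nodup_dedup n).filter _
  have hmap : (((PySem.List.dedup n).filter
      (fun i => PySem.Set.contains (pvGood n k) i)).map (fun i => k - i)).Nodup :=
    hnd.map (fun a b h => by omega)
  have h := PySem.Dict.items_foldl_insert_fresh
      ((PySem.List.dedup n).filter (fun i => PySem.Set.contains (pvGood n k) i))
      (fun i => k - i) (fun i => i) PySem.Dict.empty
      (fun a _ => PySem.Dict.contains_empty _) hmap
  have hs : searchnum_alt n k
      = (((PySem.List.dedup n).filter (fun i => PySem.Set.contains (pvGood n k) i)).foldl
          (fun d i => d.insert (k - i) i) PySem.Dict.empty).items := rfl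
  rw [hs]
  simpa using h

-- ===== VERDICT (by name: the statement is the Claim_ definition above) =====
theorem searchnum_spec : Claim_equal_searchnum := by
  intro n k _
  unfold Spec_searchnum
  have hAeq : searchnum n k = (n.foldl (pvStepA n k) PySem.Dict.empty).items := rfl
  rw [hAeq, pvAloop n k n [] PySem.Dict.empty rfl, PySem.Set.update_nil_left,
    pvOfListFilter, pvAltEq, PySem.List.dedup_eq_ofList]
  congr 1
  apply List.filter_congr
  intro i hi
  exact (pvGoodMem n k i ((PySem.Set.mem_ofList n i).mp hi)).symm
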